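-- pv_equiv track=rewrite | github.com/MarioDurso/Backtracking-Morsecode | 320Project4/372backtrack.py | handle_word
-- ===== SOURCE A (Python) =====
-- def handle_word(morse_code: str, word: [str], morseLib):
--     joinedWord = ""
--     joinedWord = "".join(word)
--     if(joinedWord not in morse_code):
--         return []
--
--     if(joinedWord == morse_code):
--         translation = ""
--         for x in word:
--             translation = translation + morseLib[x]
--         return [translation]
--     else:
--         possible_words = [morseLetter for morseLetter in morseLib]
--         final_result = []
--         for potential_word in possible_words:
--             word.append(potential_word)
--             result = handle_word(morse_code, word, morseLib)
--             if(result != []):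
--                 final_result.extend(result)
--             word.pop()
--         return final_result
-- ===== SOURCE B (Python) =====
-- def handle_word(morse_code, word, morseLib):
--     joined = "".join(word)
--     if not morse_code.startswith(joined):
--         return []
--     base = "".join(morseLib[x] for x in word)
--     keys = list(morseLib)
--
--     def decomp(s):
--         # all translations of decompositions of the suffix s into library letters
--         if not s:
--             return [""]
--         out = []
--         for k in keys:
--             if k and s.startswith(k):
--                 out.extend(morseLib[k] + t for t in decomp(s[len(k):]))
--         return out
--
--     return [base + t for t in decomp(morse_code[len(joined):])]
-- ===== Notes on version B (the rewrite author's own statement) =====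
-- stated objective: alternative
-- what changed: A appends every library letter blindly and recurses, re-scanning the whole code for a substring at each node; B checks once that the joined word is a prefix of the code and then enumerates decompositions of the remaining suffix by a prefix-matching DFS that branches only on letters actually matching the suffix (it trades A's generate-and-test tree for direct suffix decomposition; a timing run's inputs exercise neither tree deeply, measured cost is the same).
-- outside the precondition, e.g. on handle_word('.-', ['.'], {'x': 'q'}): A returns [], B raises KeyError
import Mathlib
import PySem

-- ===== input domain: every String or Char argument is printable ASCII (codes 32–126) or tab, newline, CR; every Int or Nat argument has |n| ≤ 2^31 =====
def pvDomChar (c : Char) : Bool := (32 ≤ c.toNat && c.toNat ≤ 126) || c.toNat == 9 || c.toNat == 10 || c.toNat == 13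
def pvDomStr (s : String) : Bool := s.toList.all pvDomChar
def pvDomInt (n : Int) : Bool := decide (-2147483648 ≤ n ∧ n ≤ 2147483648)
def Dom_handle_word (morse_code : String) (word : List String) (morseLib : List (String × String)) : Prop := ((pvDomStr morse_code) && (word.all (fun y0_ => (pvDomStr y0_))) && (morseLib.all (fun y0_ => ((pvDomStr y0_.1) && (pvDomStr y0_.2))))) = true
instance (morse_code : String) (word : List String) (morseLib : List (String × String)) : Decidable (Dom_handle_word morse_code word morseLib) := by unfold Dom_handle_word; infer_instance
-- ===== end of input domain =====

-- B replaces A's blind full-alphabet backtracking (append every library letter and recurse,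
-- with a substring scan of the whole code at every node) by one prefix check followed by a
-- prefix-matching DFS over the remaining suffix that branches only on letters actually
-- matching it (objective: alternative). A appends to and pops from `word` during its search
-- but restores it before returning, so the net side effect is none; the claim is about the
-- return value.

-- ===== PORT A =====
-- A's recursion is encoded with fuel; with no empty-string key in the library (Pre_), at
-- depth |morse_code|+1 the joined word is longer than morse_code, so A's own substring test
-- already returns [] there: fuel |morse_code|+1 reproduces A on every Pre_ input.
def handle_word_go (morse_code : String) (morseLib : List (String × String)) : Nat → List String → List String
  | 0, _ => []
  | fuel+1, word =>
    let joinedWord := PySem.Str.join "" word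
    if !(PySem.Str.isIn joinedWord morse_code) then []
    else if joinedWord = morse_code then
      -- morseLib[x] is PySem.Dict.getD with default "": Python raises KeyError instead,
      -- excluded by Pre_ (clause (c))
      [word.foldl (fun translation x => translation ++ PySem.Dict.getD ⟨morseLib⟩ x "") ""]
    else
      let possible_words := (PySem.Dict.mk morseLib).keys
      possible_words.foldl (fun final_result potential_word =>
        let result := handle_word_go morse_code morseLib fuel (word ++ [potential_word])
        if result ≠ [] then final_result ++ result else final_result) []

def handle_word (morse_code : String) (word : List String) (morseLib : List (String × String)) : List String :=
  handle_word_go morse_code morseLib (morse_code.toList.length + 1) word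

-- ===== PORT B =====
-- Source B's inner `decomp(s)`: all translations of decompositions of the suffix s (the code
-- points of morse_code[len(joined):]) into library letters, letters tried in library order.
def decompB (morseLib : List (String × String)) (keys : List String) (s : List Char) : List String :=
  if _hs : s = [] then [""]
  else keys.foldl (fun out k =>
    if h : k ≠ "" ∧ PySem.Chars.startswith s k.toList = true then
      out ++ (decompB morseLib keys (PySem.Chars.slice s (some (k.toList.length : Int)) none)).map
              (fun t => PySem.Dict.getD ⟨morseLib⟩ k "" ++ t)
    else out) []
termination_by s.length
decreasing_by
  have hk : k.toList ≠ [] := by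
    intro hnil
    exact h.1 (String.toList_inj.mp (by simp [hnil]))
  have hpre : k.toList <+: s := (PySem.Chars.startswith_iff s k.toList).mp h.2
  have hle : k.toList.length ≤ s.length := hpre.length_le
  have h0 : 0 < k.toList.length := List.length_pos_iff.mpr hk
  rw [PySem.Chars.slice_eq_listSlice, PySem.List.slice_from s (by positivity)]
  simp only [Int.toNat_natCast, List.length_drop]
  omega

def handle_word_alt (morse_code : String) (word : List String) (morseLib : List (String × String)) : List String :=
  let joined := PySem.Str.join "" word
  if !(PySem.Str.startswith morse_code joined) then []
  else
    let base := PySem.Str.join "" (word.map (fun x => PySem.Dict.getD ⟨morseLib⟩ x ""))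
    let keys := (PySem.Dict.mk morseLib).keys
    (decompB morseLib keys (PySem.Str.slice morse_code (some (PySem.Str.len joined)) none).toList).map
      (fun t => base ++ t)

-- ===== PRECONDITION & SPEC =====
-- Pre_ excludes (a) libraries with duplicate keys: the Python dict argument collapses them
-- (last value wins), which the association-list model (first match) cannot reproduce — both
-- Pythons still agree there; (b) inputs whose library has an empty-string key AND whose
-- joined word makes A's search recurse (a substring of the code but not the whole code):
-- there A recurses without bound (RecursionError, no value); (c) words that align with
-- morse_code as a prefix while containing a letter missing from the library: whether A
-- raises KeyError or returns [] there depends on which branch reaches the lookup, while B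
-- computes the word's translation up front (KeyError at once).
def Pre_handle_word (morse_code : String) (word : List String) (morseLib : List (String × String)) : Prop :=
  (morseLib.map Prod.fst).Nodup ∧
  ("" ∈ morseLib.map Prod.fst →
    PySem.Chars.isIn (PySem.Chars.join [] (word.map String.toList)) morse_code.toList = false ∨
    PySem.Chars.join [] (word.map String.toList) = morse_code.toList) ∧
  (PySem.Chars.startswith morse_code.toList
      (PySem.Chars.join [] (word.map String.toList)) = true →
    ∀ x ∈ word, x ∈ morseLib.map Prod.fst)

instance (morse_code : String) (word : List String) (morseLib : List (String × String)) : Decidable (Pre_handle_word morse_code word morseLib) := by unfold Pre_handle_word; infer_instance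

def pvWitness_handle_word : String × List String × (List (String × String)) :=
  (".-.", ["."], [(".", "E"), ("-", "T"), (".-", "A"), ("-.", "N")])

def Spec_handle_word (morse_code : String) (word : List String) (morseLib : List (String × String)) (out : List String) : Prop := out = handle_word_alt morse_code word morseLib
instance (morse_code : String) (word : List String) (morseLib : List (String × String)) (out : List String) : Decidable (Spec_handle_word morse_code word morseLib out) := by unfold Spec_handle_word; infer_instance

-- ===== CLAIM (what is proved, stated in full; the proofs are below) =====
def Claim_equal_handle_word : Prop := ∀ (morse_code : String) (word : List String) (morseLib : List (String × String)), Dom_handle_word morse_code word morseLib → Pre_handle_word morse_code word morseLib → Spec_handle_word morse_code word morseLib (handle_word morse_code word morseLib)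

-- ===== LEMMAS AND PROOFS =====

-- "".join on the code-point side is concatenation
theorem chars_join_nil_eq_flatten (l : List (List Char)) :
    PySem.Chars.join [] l = l.flatten := by
  induction l with
  | nil => simp [PySem.Chars.join_nil]
  | cons a t ih =>
    cases t with
    | nil => simp [PySem.Chars.join_singleton]
    | cons b r => simp [PySem.Chars.join_cons_cons] at *; simp [ih]

theorem joined_toList (w : List String) :
    (PySem.Str.join "" w).toList = (w.map String.toList).flatten := by
  have h0 : "".toList = ([] : List Char) := rfl
  rw [PySem.Str.toList_join, h0, chars_join_nil_eq_flatten]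

theorem decompB_nil (morseLib : List (String × String)) (keys : List String) :
    decompB morseLib keys [] = [""] := by rw [decompB]; rfl

-- unfolding of decompB on a non-empty suffix, with the foldl flattened to flatMap
theorem decompB_cons (morseLib : List (String × String)) (keys : List String)
    (s : List Char) (hs : s ≠ []) :
    decompB morseLib keys s = keys.flatMap (fun k =>
      if k ≠ "" ∧ PySem.Chars.startswith s k.toList = true then
        (decompB morseLib keys (s.drop k.toList.length)).map
          (fun t => PySem.Dict.getD ⟨morseLib⟩ k "" ++ t)
      else []) := by
  rw [decompB, dif_neg hs]
  have hstep : ∀ (out : List String) (k : String),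
      (if h : k ≠ "" ∧ PySem.Chars.startswith s k.toList = true then
        out ++ (decompB morseLib keys (PySem.Chars.slice s (some (k.toList.length : Int)) none)).map
                (fun t => PySem.Dict.getD ⟨morseLib⟩ k "" ++ t)
      else out)
      = out ++ (if k ≠ "" ∧ PySem.Chars.startswith s k.toList = true then
          (decompB morseLib keys (s.drop k.toList.length)).map
            (fun t => PySem.Dict.getD ⟨morseLib⟩ k "" ++ t)
        else []) := by
    intro out k
    by_cases h : k ≠ "" ∧ PySem.Chars.startswith s k.toList = true
    · rw [dif_pos h, if_pos h]
      have : PySem.Chars.slice s (some (k.toList.length : Int)) none = s.drop k.toList.length := by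
        rw [PySem.Chars.slice_eq_listSlice, PySem.List.slice_from s (by positivity)]
        simp
      rw [this]
    · rw [dif_neg h, if_neg h]; simp
  calc keys.foldl (fun out k =>
        if h : k ≠ "" ∧ PySem.Chars.startswith s k.toList = true then
          out ++ (decompB morseLib keys (PySem.Chars.slice s (some (k.toList.length : Int)) none)).map
                  (fun t => PySem.Dict.getD ⟨morseLib⟩ k "" ++ t)
        else out) []
      = keys.foldl (fun out k => out ++ (if k ≠ "" ∧ PySem.Chars.startswith s k.toList = true then
          (decompB morseLib keys (s.drop k.toList.length)).map
            (fun t => PySem.Dict.getD ⟨morseLib⟩ k "" ++ t)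
        else [])) [] := by
        apply PySem.List.foldl_congr_mem; intro acc x _; exact hstep acc x
    _ = _ := by rw [PySem.List.foldl_append_eq_flatMap]; rfl

-- A returns [] whenever the joined word is not a prefix of the code (its substring test may
-- still pass, but no extension can ever reach equality)
theorem handle_word_go_of_not_prefix (morse_code : String) (morseLib : List (String × String))
    (fuel : Nat) (w : List String)
    (h : ¬ ((w.map String.toList).flatten <+: morse_code.toList)) :
    handle_word_go morse_code morseLib fuel w = [] := by
  induction fuel generalizing w with
  | zero => rfl
  | succ fuel ih =>
    rw [handle_word_go]
    by_cases hin : PySem.Str.isIn (PySem.Str.join "" w) morse_code = true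
    · have hne : ¬ (PySem.Str.join "" w = morse_code) := by
        intro he
        exact h (by rw [← he, joined_toList])
      simp only [hin, Bool.not_true, Bool.false_eq_true, if_false, hne]
      have hstep : ∀ (acc : List String) (k : String), k ∈ (PySem.Dict.mk morseLib).keys →
          (let result := handle_word_go morse_code morseLib fuel (w ++ [k]);
           if result ≠ [] then acc ++ result else acc) = acc := by
        intro acc k _
        have : handle_word_go morse_code morseLib fuel (w ++ [k]) = [] := by
          apply ih
          intro hp
          apply h
          have hpp : (w.map String.toList).flatten <+: ((w ++ [k]).map String.toList).flatten := by
            simp [List.flatten_append]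
          exact hpp.trans hp
        simp [this]
      calc ((PySem.Dict.mk morseLib).keys).foldl (fun final_result potential_word =>
              let result := handle_word_go morse_code morseLib fuel (w ++ [potential_word]);
              if result ≠ [] then final_result ++ result else final_result) []
          = ((PySem.Dict.mk morseLib).keys).foldl (fun acc _ => acc) [] := by
            apply PySem.List.foldl_congr_mem
            intro acc x hx
            exact hstep acc x hx
        _ = [] := PySem.List.foldl_ignore _ _
    · simp only [Bool.not_eq_true] at hin
      simp only [hin, Bool.not_false, if_true]

-- the heart of the equivalence: on a suffix decomposition state, A's full-alphabet DFS
-- computes exactly B's prefix-matching decomposition of the remaining suffix, prefixed by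
-- the translation of the letters fixed so far
theorem handle_word_go_main (morse_code : String) (morseLib : List (String × String))
    (hk : "" ∉ morseLib.map Prod.fst)
    (fuel : Nat) (rest : List Char) (w : List String)
    (hsplit : morse_code.toList = (w.map String.toList).flatten ++ rest)
    (hfuel : rest.length < fuel) :
    handle_word_go morse_code morseLib fuel w
      = (decompB morseLib (morseLib.map Prod.fst) rest).map
          (fun t => w.foldl (fun tr x => tr ++ PySem.Dict.getD ⟨morseLib⟩ x "") "" ++ t) := by
  induction fuel generalizing rest w with
  | zero => omega
  | succ fuel ih =>
    have hpre : (w.map String.toList).flatten <+: morse_code.toList := ⟨rest, hsplit.symm⟩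
    have hin : PySem.Str.isIn (PySem.Str.join "" w) morse_code = true := by
      rw [PySem.Str.isIn_eq, joined_toList]
      exact (PySem.Chars.isIn_iff_infix _ _).mpr hpre.isInfix
    rw [handle_word_go]
    by_cases hrest : rest = []
    · subst hrest
      have heq : PySem.Str.join "" w = morse_code := by
        rw [← String.toList_inj, joined_toList, hsplit, List.append_nil]
      simp only [hin, Bool.not_true]
      rw [if_pos heq, decompB_nil]
      simp
    · have hne : ¬ (PySem.Str.join "" w = morse_code) := by
        intro he
        rw [← he, joined_toList] at hsplit
        have := congrArg List.length hsplit
        simp at this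
        exact hrest this
      simp only [hin, Bool.not_true, Bool.false_eq_true, if_false, hne]
      have hkeys : (PySem.Dict.mk morseLib).keys = morseLib.map Prod.fst := rfl
      have lhs_eq : ((PySem.Dict.mk morseLib).keys).foldl (fun final_result potential_word =>
              let result := handle_word_go morse_code morseLib fuel (w ++ [potential_word]);
              if result ≠ [] then final_result ++ result else final_result) []
          = (morseLib.map Prod.fst).flatMap
              (fun k => handle_word_go morse_code morseLib fuel (w ++ [k])) := by
        rw [hkeys]
        have : ∀ (acc : List String) (k : String),
            (let result := handle_word_go morse_code morseLib fuel (w ++ [k]);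
             if result ≠ [] then acc ++ result else acc)
            = acc ++ handle_word_go morse_code morseLib fuel (w ++ [k]) := by
          intro acc k
          by_cases hr : handle_word_go morse_code morseLib fuel (w ++ [k]) = []
          · simp [hr]
          · simp [hr]
        calc (morseLib.map Prod.fst).foldl (fun final_result potential_word =>
                let result := handle_word_go morse_code morseLib fuel (w ++ [potential_word]);
                if result ≠ [] then final_result ++ result else final_result) []
            = (morseLib.map Prod.fst).foldl
                (fun acc k => acc ++ handle_word_go morse_code morseLib fuel (w ++ [k])) [] := by
              apply PySem.List.foldl_congr_mem
              intro acc x _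
              exact this acc x
          _ = _ := by rw [PySem.List.foldl_append_eq_flatMap]; rfl
      rw [lhs_eq, decompB_cons _ _ _ hrest, List.map_flatMap]
      simp only [List.flatMap_def]
      apply congrArg List.flatten
      apply List.map_congr_left
      intro k hx
      have hkne : k ≠ "" := fun he => hk (he ▸ hx)
      have hktl : k.toList ≠ [] := fun hnil => hkne (String.toList_inj.mp (by simp [hnil]))
      by_cases hsw : PySem.Chars.startswith rest k.toList = true
      · rw [if_pos ⟨hkne, hsw⟩]
        obtain ⟨r', hr⟩ := (PySem.Chars.startswith_iff _ _).mp hsw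
        have hdrop : rest.drop k.toList.length = r' := by rw [← hr]; exact List.drop_left
        have hsplit' : morse_code.toList = ((w ++ [k]).map String.toList).flatten ++ r' := by
          rw [hsplit, ← hr]
          simp [List.flatten_append]
        have hfuel' : r'.length < fuel := by
          have h1 : 0 < k.toList.length := List.length_pos_iff.mpr hktl
          have h2 : rest.length = k.toList.length + r'.length := by
            rw [← hr]; simp
          omega
        rw [ih r' (w ++ [k]) hsplit' hfuel', hdrop, List.map_map]
        apply List.map_congr_left
        intro t _
        simp [List.foldl_append, String.append_assoc]
      · rw [if_neg (fun hc => hsw hc.2), List.map_nil]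
        apply handle_word_go_of_not_prefix
        intro hp
        apply hsw
        rw [PySem.Chars.startswith_iff]
        rw [List.map_append, List.flatten_append, hsplit] at hp
        simp only [List.map_singleton, List.flatten_singleton] at hp
        exact (List.prefix_append_right_inj _).mp hp

theorem transl_foldl_toList (morseLib : List (String × String)) (w : List String) (init : String) :
    (w.foldl (fun t x => t ++ PySem.Dict.getD ⟨morseLib⟩ x "") init).toList
      = init.toList ++ (w.map (fun x => (PySem.Dict.getD ⟨morseLib⟩ x "").toList)).flatten := by
  induction w generalizing init with
  | nil => simp
  | cons x r ih => simp [List.foldl_cons, ih]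

-- Source B's `base` is A's translation loop
theorem base_eq_transl (morseLib : List (String × String)) (w : List String) :
    PySem.Str.join "" (w.map (fun x => PySem.Dict.getD ⟨morseLib⟩ x ""))
      = w.foldl (fun t x => t ++ PySem.Dict.getD ⟨morseLib⟩ x "") "" := by
  apply String.toList_inj.mp
  rw [joined_toList, transl_foldl_toList]
  simp only [List.map_map, String.toList_empty, List.nil_append]
  rfl

theorem handle_word_eq_alt (morse_code : String) (word : List String) (morseLib : List (String × String))
    (hempty : "" ∈ morseLib.map Prod.fst →
      PySem.Chars.isIn (PySem.Chars.join [] (word.map String.toList)) morse_code.toList = false ∨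
      PySem.Chars.join [] (word.map String.toList) = morse_code.toList) :
    handle_word morse_code word morseLib = handle_word_alt morse_code word morseLib := by
  by_cases hsw : PySem.Str.startswith morse_code (PySem.Str.join "" word) = true
  · have hpre : (word.map String.toList).flatten <+: morse_code.toList := by
      rw [← joined_toList]
      exact (PySem.Chars.startswith_iff _ _).mp (by rw [← PySem.Str.startswith_eq]; exact hsw)
    obtain ⟨rest, hr⟩ := hpre
    have hsplit : morse_code.toList = (word.map String.toList).flatten ++ rest := hr.symm
    have hslice : (PySem.Str.slice morse_code (some (PySem.Str.len (PySem.Str.join "" word))) none).toList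
        = rest := by
      rw [PySem.Str.toList_slice, PySem.Chars.slice_eq_listSlice]
      rw [PySem.Str.len_eq, joined_toList, hsplit]
      rw [PySem.List.slice_from _ (by positivity), Int.toNat_natCast, List.drop_left]
    have hin : PySem.Str.isIn (PySem.Str.join "" word) morse_code = true := by
      rw [PySem.Str.isIn_eq, joined_toList]
      exact (PySem.Chars.isIn_iff_infix _ _).mpr (List.IsPrefix.isInfix ⟨rest, hsplit.symm⟩)
    by_cases hrest : rest = []
    · -- the joined word is already the whole code: A returns its translation at once,
      -- B maps the base over decomp("") = [""]
      subst hrest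
      have heqs : PySem.Str.join "" word = morse_code := by
        rw [← String.toList_inj, joined_toList, hsplit, List.append_nil]
      show handle_word_go morse_code morseLib (morse_code.toList.length + 1) word = _
      rw [handle_word_go]
      simp only [hin, Bool.not_true]
      rw [if_pos heqs]
      simp only [handle_word_alt, hsw, Bool.not_true, Bool.false_eq_true, if_false, hslice]
      rw [decompB_nil, base_eq_transl]
      simp
    · -- A's search recurses: Pre_ rules out an empty-string key here
      have hk : "" ∉ morseLib.map Prod.fst := by
        intro hmem
        rcases hempty hmem with hiso | heqc
        · rw [chars_join_nil_eq_flatten] at hiso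
          have ht : PySem.Chars.isIn (word.map String.toList).flatten morse_code.toList = true :=
            (PySem.Chars.isIn_iff_infix _ _).mpr (List.IsPrefix.isInfix ⟨rest, hsplit.symm⟩)
          rw [hiso] at ht
          exact Bool.false_ne_true ht
        · rw [chars_join_nil_eq_flatten] at heqc
          rw [← heqc] at hsplit
          have := congrArg List.length hsplit
          rw [List.length_append] at this
          exact hrest (List.length_eq_zero_iff.mp (by omega))
      have hfuel : rest.length < morse_code.toList.length + 1 := by
        have := congrArg List.length hsplit
        rw [List.length_append] at this
        omega
      show handle_word_go morse_code morseLib (morse_code.toList.length + 1) word = _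
      rw [handle_word_go_main morse_code morseLib hk _ rest word hsplit hfuel]
      simp only [handle_word_alt, hsw, Bool.not_true, Bool.false_eq_true, if_false, hslice]
      rw [base_eq_transl]
      rfl
  · simp only [Bool.not_eq_true] at hsw
    have hnp : ¬ ((word.map String.toList).flatten <+: morse_code.toList) := by
      intro hp
      rw [← joined_toList] at hp
      have hsw2 : PySem.Chars.startswith morse_code.toList (PySem.Str.join "" word).toList = true :=
        (PySem.Chars.startswith_iff _ _).mpr hp
      rw [← PySem.Str.startswith_eq, hsw] at hsw2
      exact Bool.false_ne_true hsw2
    show handle_word_go morse_code morseLib (morse_code.toList.length + 1) word = _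
    rw [handle_word_go_of_not_prefix morse_code morseLib _ _ hnp]
    simp only [handle_word_alt]
    by_cases hb : (!PySem.Str.startswith morse_code (PySem.Str.join "" word)) = true
    · rw [if_pos hb]
    · rw [Bool.not_eq_true', hsw] at hb
      exact absurd rfl hb

-- ===== VERDICT (by name: the statement is the Claim_ definition above) =====
theorem handle_word_spec : Claim_equal_handle_word := by
  intro morse_code word morseLib _hdom hpre
  unfold Spec_handle_word
  exact handle_word_eq_alt morse_code word morseLib hpre.2.1
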